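-- pv_equiv track=rewrite | github.com/riku-studio/EREX | backend/app/services/extractor.py | _sorted_keywords
-- ===== SOURCE A (Python) =====
-- from typing import Dict, List, Sequence, Set
--
-- def _sorted_keywords(groups: Dict[str, List[str]]) -> List[str]:
--     seen: Set[str] = set()
--     keywords: List[str] = []
--     for values in groups.values():
--         for kw in values:
--             if kw not in seen:
--                 seen.add(kw)
--                 keywords.append(kw)
--     return sorted(keywords, key=len, reverse=True)
-- ===== SOURCE B (Python) =====
-- from typing import Dict, List
--
--
-- def _sorted_keywords(groups: Dict[str, List[str]]) -> List[str]:
--     ks = list(dict.fromkeys(kw for values in groups.values() for kw in values))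
--     buckets: Dict[int, List[str]] = {}
--     for kw in ks:
--         buckets.setdefault(len(kw), []).append(kw)
--     longest = 0
--     for kw in ks:
--         if len(kw) > longest:
--             longest = len(kw)
--     out: List[str] = []
--     for n in range(longest, -1, -1):
--         out.extend(buckets.get(n, []))
--     return out
-- ===== Notes on version B (the rewrite author's own statement) =====
-- stated objective: alternative
-- what changed: Replaces the comparison sort (sorted key=len reverse=True) by bucketing the deduplicated keywords into per-length lists and emitting the buckets with a countdown over lengths, which reproduces the stable descending-length order without comparing elements.
import Mathlib
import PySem

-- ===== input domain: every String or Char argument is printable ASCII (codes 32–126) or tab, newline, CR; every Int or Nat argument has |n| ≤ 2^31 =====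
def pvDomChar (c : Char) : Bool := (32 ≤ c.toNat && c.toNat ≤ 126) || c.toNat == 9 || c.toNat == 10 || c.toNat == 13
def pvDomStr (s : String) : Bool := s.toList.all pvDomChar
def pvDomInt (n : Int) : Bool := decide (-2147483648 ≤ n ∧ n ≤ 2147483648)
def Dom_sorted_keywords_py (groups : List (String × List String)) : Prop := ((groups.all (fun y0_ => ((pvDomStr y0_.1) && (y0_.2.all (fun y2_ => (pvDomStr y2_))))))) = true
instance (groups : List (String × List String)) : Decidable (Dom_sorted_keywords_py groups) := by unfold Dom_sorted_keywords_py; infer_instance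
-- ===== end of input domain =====

-- B replaces the stable descending-length sort by per-length buckets emitted via a
-- countdown over lengths (alternative decomposition; no element comparisons).

-- ===== PORT A =====
def sorted_keywords_py (groups : List (String × List String)) : List String :=
  let st := groups.foldl
    (fun (st : PySem.Set String × List String) values =>
      values.2.foldl
        (fun st kw =>
          if PySem.Set.contains st.1 kw then st
          else (PySem.Set.add st.1 kw, st.2 ++ [kw]))
        st)
    (PySem.Set.empty, [])
  PySem.List.sorted st.2 (fun s => PySem.Str.len s) true

-- ===== PORT B =====
def sorted_keywords_py_alt (groups : List (String × List String)) : List String :=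
  let ks := PySem.List.dedup (groups.flatMap (fun g => g.2))
  let buckets := ks.foldl
    (fun d kw => d.modify (PySem.Str.len kw) [] (fun b => b ++ [kw])) PySem.Dict.empty
  let longest := ks.foldl
    (fun m kw => if PySem.Str.len kw > m then PySem.Str.len kw else m) (0 : Int)
  (PySem.List.pyRange longest (-1) (-1)).foldl (fun out n => out ++ buckets.getD n []) []

-- ===== PRECONDITION & SPEC =====
def Spec_sorted_keywords_py (groups : List (String × List String)) (out : List String) : Prop := out = sorted_keywords_py_alt groups
instance (groups : List (String × List String)) (out : List String) : Decidable (Spec_sorted_keywords_py groups out) := by unfold Spec_sorted_keywords_py; infer_instance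

-- ===== CLAIM (what is proved, stated in full; the proofs are below) =====
def Claim_equal_sorted_keywords_py : Prop := ∀ (groups : List (String × List String)), Dom_sorted_keywords_py groups → Spec_sorted_keywords_py groups (sorted_keywords_py groups)

-- ===== LEMMAS AND PROOFS =====

-- A's (seen, keywords) pair keeps both components equal; each step is PySem.Set.add.
theorem pvPairFold (l : List String) :
    ∀ (s : List String),
      l.foldl
        (fun (st : PySem.Set String × List String) kw =>
          if PySem.Set.contains st.1 kw then st
          else (PySem.Set.add st.1 kw, st.2 ++ [kw])) (s, s)
      = (l.foldl PySem.Set.add s, l.foldl PySem.Set.add s) := by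
  induction l with
  | nil => intro s; rfl
  | cons a t ih =>
    intro s
    simp only [List.foldl_cons]
    have hstep : (if PySem.Set.contains s a then ((s : PySem.Set String), (s : List String))
        else (PySem.Set.add s a, s ++ [a])) = (PySem.Set.add s a, PySem.Set.add s a) := by
      by_cases h : a ∈ s <;> simp [PySem.Set.add, PySem.Set.contains, h]
    rw [hstep]
    exact ih (PySem.Set.add s a)

theorem pvNestedFold (groups : List (String × List String)) :
    ∀ (s : List String),
      groups.foldl
        (fun (st : PySem.Set String × List String) values =>
          values.2.foldl
            (fun st kw =>
              if PySem.Set.contains st.1 kw then st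
              else (PySem.Set.add st.1 kw, st.2 ++ [kw])) st) (s, s)
      = ((groups.flatMap (fun g => g.2)).foldl PySem.Set.add s,
         (groups.flatMap (fun g => g.2)).foldl PySem.Set.add s) := by
  induction groups with
  | nil => intro s; rfl
  | cons g t ih =>
    intro s
    simp only [List.foldl_cons, List.flatMap_cons, List.foldl_append]
    rw [pvPairFold]
    exact ih (g.2.foldl PySem.Set.add s)

-- insertBy skips a prefix it does not insert before
theorem pvInsertBy_append_skip {α : Type} (bf : α → α → Bool) (x : α) (as bs : List α)
    (h : ∀ a ∈ as, bf x a = false) :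
    PySem.List.insertBy bf x (as ++ bs) = as ++ PySem.List.insertBy bf x bs := by
  induction as with
  | nil => rfl
  | cons a t ih =>
    simp only [List.cons_append, PySem.List.insertBy, h a (by simp), Bool.false_eq_true,
      if_false]
    rw [ih (fun a ha => h a (by simp [ha]))]

theorem pvInsertBy_front {α : Type} (key : α → Int) (x : α) (bs : List α)
    (h : ∀ b ∈ bs, key b < key x) :
    PySem.List.insertBy (fun a b => decide (key b < key a)) x bs = x :: bs := by
  cases bs with
  | nil => rfl
  | cons b t => simp [PySem.List.insertBy, h b (by simp)]

theorem pvFlatMap_ite_false {α : Type} (key : α → Int) (x : α) (f : Int → List α) :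
    ∀ (Ls : List Int), (∀ L ∈ Ls, (key x == L) = false) →
      Ls.flatMap (fun L => f L ++ if key x == L then [x] else []) = Ls.flatMap f := by
  intro Ls h
  induction Ls with
  | nil => rfl
  | cons L t ih =>
    simp only [List.flatMap_cons, h L (by simp), Bool.false_eq_true, if_false, List.append_nil]
    rw [ih (fun L hL => h L (by simp [hL]))]

-- inserting x into descending buckets appends it to its own bucket
theorem pvInsertBy_flatMap {α : Type} (key : α → Int) (x : α) (f : Int → List α) :
    ∀ (Ls : List Int), Ls.Pairwise (· > ·) → key x ∈ Ls →
      (∀ L ∈ Ls, ∀ y ∈ f L, key y = L) →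
      PySem.List.insertBy (fun a b => decide (key b < key a)) x (Ls.flatMap f)
        = Ls.flatMap (fun L => f L ++ if key x == L then [x] else []) := by
  intro Ls
  induction Ls with
  | nil => intro _ hmem; exact absurd hmem (by simp)
  | cons L t ih =>
    intro hpw hmem hkeys
    rcases List.pairwise_cons.mp hpw with ⟨hgt, hpw'⟩
    simp only [List.flatMap_cons]
    by_cases hL : key x = L
    · rw [pvInsertBy_append_skip _ _ _ _
        (fun a ha => by
          have := hkeys L (by simp) a ha
          simp [this, hL])]
      rw [pvInsertBy_front key x _
        (fun b hb => by
          rcases List.mem_flatMap.mp hb with ⟨L', hL', hb'⟩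
          have := hkeys L' (by simp [hL']) b hb'
          have hlt : L' < L := hgt L' hL'
          omega)]
      rw [pvFlatMap_ite_false key x f t
        (fun L' hL' => by
          have : L' < L := hgt L' hL'
          simp; omega)]
      simp [hL]
    · have hmem' : key x ∈ t := by
        rcases List.mem_cons.mp hmem with h | h
        · exact absurd h hL
        · exact h
      rw [pvInsertBy_append_skip _ _ _ _
        (fun a ha => by
          have hk := hkeys L (by simp) a ha
          have : key x < L := hgt _ hmem'
          simp [hk]; omega)]
      rw [ih hpw' hmem' (fun L' hL' => hkeys L' (by simp [hL']))]
      simp [beq_iff_eq, hL]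

-- the stable reversed sort by key is the concatenation of the key-buckets, keys descending
theorem pvSortedRevEqFlatMap {α : Type} (key : α → Int) :
    ∀ (xs : List α) (Ls : List Int), Ls.Pairwise (· > ·) → (∀ x ∈ xs, key x ∈ Ls) →
      PySem.List.sorted xs key true = Ls.flatMap (fun L => xs.filter (fun x => key x == L)) := by
  intro xs
  induction xs using List.reverseRecOn with
  | nil => intro Ls _ _; simp [PySem.List.sorted]
  | append_singleton xs x ih =>
    intro Ls hpw hmem
    have hstep : PySem.List.sorted (xs ++ [x]) key true
        = PySem.List.insertBy (fun a b => decide (key b < key a)) x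
            (PySem.List.sorted xs key true) := by
      rw [PySem.List.sorted_rev_eq_foldl_insertBy, PySem.List.sorted_rev_eq_foldl_insertBy,
        List.foldl_append]
      rfl
    rw [hstep, ih Ls hpw (fun y hy => hmem y (by simp [hy]))]
    rw [pvInsertBy_flatMap key x _ Ls hpw (hmem x (by simp))
      (fun L _ y hy => by
        have := List.of_mem_filter hy
        exact beq_iff_eq.mp this)]
    apply List.flatMap_congr
    intro L _
    rw [List.filter_append]
    congr 1
    by_cases h : key x = L
    · simp [List.filter, h]
    · have hb : (key x == L) = false := by simp [h]
      simp [List.filter, hb]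

-- B's bucket dict looks up to a filter
theorem pvBucketsGetD (ks : List String) (c : Int) :
    (ks.foldl (fun d kw => d.modify (PySem.Str.len kw) [] (fun b => b ++ [kw]))
        PySem.Dict.empty).getD c []
      = ks.filter (fun kw => PySem.Str.len kw == c) := by
  have h : ks.foldl (fun d kw => d.modify (PySem.Str.len kw) [] (fun b => b ++ [kw]))
        PySem.Dict.empty
      = (ks.map (fun kw => (PySem.Str.len kw, kw))).foldl
          (fun d p => d.modify p.1 [] (fun b => b ++ [p.2])) PySem.Dict.empty := by
    rw [List.foldl_map]
  rw [h, PySem.Dict.getD_foldl_modify_append, PySem.Dict.getD_empty, List.filter_map]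
  simp [Function.comp_def, PySem.Str.len]

-- the running maximum never decreases below its start
theorem pvFoldlMaxInit (l : List String) :
    ∀ (m : Int), m ≤ l.foldl
      (fun m kw => if PySem.Str.len kw > m then PySem.Str.len kw else m) m := by
  induction l with
  | nil => intro m; simp
  | cons a t ih =>
    intro m
    simp only [List.foldl_cons]
    calc m ≤ (if PySem.Str.len a > m then PySem.Str.len a else m) := by split_ifs <;> omega
      _ ≤ _ := ih _

-- the running maximum bounds every element
theorem pvFoldlMax (l : List String) :
    ∀ (m : Int), ∀ kw ∈ l,
      PySem.Str.len kw ≤ l.foldl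
        (fun m kw => if PySem.Str.len kw > m then PySem.Str.len kw else m) m := by
  induction l with
  | nil => intro m kw hkw; exact absurd hkw (by simp)
  | cons a t ih =>
    intro m kw hkw
    simp only [List.foldl_cons]
    rcases List.mem_cons.mp hkw with h | h
    · subst h
      calc PySem.Str.len kw ≤ (if PySem.Str.len kw > m then PySem.Str.len kw else m) := by
            split_ifs <;> omega
        _ ≤ _ := pvFoldlMaxInit t _
    · exact ih _ kw h

-- A's dedup loop from the empty state computes dict.fromkeys of the flattened values
theorem pvNestedFold0 (groups : List (String × List String)) :
    groups.foldl
      (fun (st : PySem.Set String × List String) values =>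
        values.2.foldl
          (fun st kw =>
            if PySem.Set.contains st.1 kw then st
            else (PySem.Set.add st.1 kw, st.2 ++ [kw])) st)
      (PySem.Set.empty, [])
    = (PySem.List.dedup (groups.flatMap (fun g => g.2)),
       PySem.List.dedup (groups.flatMap (fun g => g.2))) :=
  pvNestedFold groups []

-- ===== VERDICT (by name: the statement is the Claim_ definition above) =====
theorem sorted_keywords_py_spec : Claim_equal_sorted_keywords_py := by
  intro groups _
  show sorted_keywords_py groups = sorted_keywords_py_alt groups
  simp only [sorted_keywords_py, sorted_keywords_py_alt]
  rw [pvNestedFold0]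
  set ks := PySem.List.dedup (groups.flatMap (fun g => g.2)) with hksdef
  set longest := ks.foldl
    (fun m kw => if PySem.Str.len kw > m then PySem.Str.len kw else m) (0 : Int) with hlongest
  rw [PySem.List.foldl_append_eq_flatMap, List.nil_append]
  have hpw : (PySem.List.pyRange longest (-1) (-1)).Pairwise (· > ·) := by
    rw [PySem.List.pyRange_neg_one_eq_reverse, List.pairwise_reverse]
    simpa using PySem.List.pairwise_lt_pyRange_one (-1 + 1) (longest + 1)
  have hmem : ∀ x ∈ ks, PySem.Str.len x ∈ PySem.List.pyRange longest (-1) (-1) := by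
    intro x hx
    rw [PySem.List.mem_pyRange_neg_one]
    constructor
    · have : (0 : Int) ≤ PySem.Str.len x := by simp [PySem.Str.len]
      omega
    · exact pvFoldlMax ks 0 x hx
  rw [pvSortedRevEqFlatMap (fun s => PySem.Str.len s) ks _ hpw hmem]
  apply List.flatMap_congr
  intro L _
  rw [pvBucketsGetD]
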